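-- pv_equiv track=rewrite | github.com/pypi-data/pypi-mirror-352 | packages/fuckcode/fuckcode-0.0.12.tar.gz/fuckcode-0.0.12/fuckcode/translate.py | translate_fc_to_cpp
-- ===== SOURCE A (Python) =====
-- def translate_fc_to_cpp(fc_code: str) -> str:
--     """将.fc代码转换为.cpp代码
--
--     Args:
--         fc_code: 输入的.fc格式代码字符串
--
--     Returns:
--         转换后的.cpp格式代码字符串
--     """
--     lines = fc_code.splitlines()
--     cpp_lines = []
--     indent_stack = []  # 缩进栈，记录函数/代码块起始缩进
--     pending_braces = []  # 待闭合的花括号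
--
--     for line in lines:
--         stripped = line.lstrip()
--         if not stripped:  # 空行
--             cpp_lines.append(line)
--             continue
--
--         current_indent = len(line) - len(stripped)
--
--         # 处理待闭合的花括号
--         while pending_braces and current_indent <= pending_braces[-1]:
--             cpp_lines.append(' ' * pending_braces.pop() + '}')
--
--         # 处理函数定义后的冒号
--         if stripped.endswith(':'):
--             cpp_lines.append(line.replace(':', ' {'))
--             indent_stack.append(current_indent)
--             pending_braces.append(current_indent)
--             continue
--
--         # 添加分号（排除预处理指令和注释）
--         if not (stripped.startswith('#') or stripped.startswith('//')):
--             if not stripped.endswith(';'):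
--                 line = line.rstrip() + ';'
--
--         cpp_lines.append(line)
--
--     # 关闭所有未闭合的花括号
--     while pending_braces:
--         cpp_lines.append(' ' * pending_braces.pop() + '}')
--
--     return '\n'.join(cpp_lines)
-- ===== SOURCE B (Python) =====
-- def translate_fc_to_cpp(fc_code: str) -> str:
--     """Recursive off-side-rule translation of .fc code to .cpp."""
--     lines = fc_code.splitlines()
--     out = []
--
--     def block(i, level):
--         # Emit the block whose enclosing header is indented `level`
--         # (None at top level); return the index of the first line
--         # belonging to an outer block.
--         while i < len(lines):
--             line = lines[i]
--             stripped = line.lstrip()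
--             if not stripped:                    # blank: verbatim
--                 out.append(line)
--                 i += 1
--                 continue
--             indent = len(line) - len(stripped)
--             if level is not None and indent <= level:
--                 return i                        # caller closes its brace
--             if stripped.endswith(':'):          # header: open a block
--                 out.append(line.replace(':', ' {'))
--                 i = block(i + 1, indent)
--                 out.append(' ' * indent + '}')
--             else:
--                 if not (stripped.startswith('#') or stripped.startswith('//')):
--                     if not stripped.endswith(';'):
--                         line = line.rstrip() + ';'
--                 out.append(line)
--                 i += 1
--         return i
--
--     block(0, None)
--     return '\n'.join(out)
-- ===== Notes on version B (the rewrite author's own statement) =====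
-- stated objective: alternative
-- what changed: Replaced the explicit pending-brace stack loop (and dead indent_stack) by a recursive off-side-rule descent: each `:`-header recurses into its block and emits its own closing brace when the recursion returns on a dedent or at EOF.
import Mathlib
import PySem

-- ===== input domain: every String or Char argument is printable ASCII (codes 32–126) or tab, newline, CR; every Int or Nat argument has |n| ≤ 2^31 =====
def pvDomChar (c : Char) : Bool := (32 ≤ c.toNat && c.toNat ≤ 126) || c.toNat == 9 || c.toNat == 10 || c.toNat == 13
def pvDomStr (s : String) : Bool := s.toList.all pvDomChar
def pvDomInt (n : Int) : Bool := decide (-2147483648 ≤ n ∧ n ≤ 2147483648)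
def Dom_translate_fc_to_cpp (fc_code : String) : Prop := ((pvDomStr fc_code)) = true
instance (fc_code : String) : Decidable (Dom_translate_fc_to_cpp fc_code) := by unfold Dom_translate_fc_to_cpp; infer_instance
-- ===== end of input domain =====

-- B replaces A's explicit pending-brace stack (and dead indent_stack) by a recursive
-- off-side-rule descent; same output, same O(n) cost (objective: alternative).

-- ===== PORT A =====
-- Lines are handled as List Char (PySem.Chars is exact on the domain); indents are
-- Nats since len(line) - len(lstrip(line)) is never negative.
def pvBraceA (n : Nat) : List Char := List.replicate n ' ' ++ ['}']  -- ' ' * n + '}'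

-- the inner `while pending_braces and current_indent <= pending_braces[-1]` loop
-- (head of the list = top of the Python stack); returns (emitted braces, new stack)
def pvCloseWhile (ci : Nat) : List Nat → List (List Char) × List Nat
  | [] => ([], [])
  | t :: p =>
    if ci ≤ t then
      let r := pvCloseWhile ci p
      (pvBraceA t :: r.1, r.2)
    else ([], t :: p)

-- the main `for line in lines` loop (output emitted in order; the dead indent_stack
-- of A, which is written but never read, is not carried)
def pvLoopA : List (List Char) → List Nat → List (List Char)
  | [], pending => pending.map pvBraceA          -- final `while pending_braces` loop
  | line :: rest, pending =>
    let s := PySem.Chars.lstrip line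
    if s.isEmpty then line :: pvLoopA rest pending
    else
      let ci := line.length - s.length
      let cp := pvCloseWhile ci pending
      if PySem.Chars.endswith s [':'] then
        cp.1 ++ PySem.Chars.replace line [':'] [' ', '{'] :: pvLoopA rest (ci :: cp.2)
      else
        let line2 :=
          if !(PySem.Chars.startswith s ['#'] || PySem.Chars.startswith s ['/', '/']) &&
             !(PySem.Chars.endswith s [';'])
          then PySem.Chars.rstrip line ++ [';'] else line
        cp.1 ++ line2 :: pvLoopA rest cp.2

def translate_fc_to_cpp (fc_code : String) : String :=
  String.mk (PySem.Chars.join ['\n']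
    (pvLoopA ((PySem.Str.splitlines fc_code).map String.toList) []))

-- ===== PORT B =====
-- `block(i, level)` of Source B: emits the block under a header indented `level`
-- (none at top level) and returns the remaining lines (Source B's index i, as a suffix).
-- The subtype fact `rest gets no longer` only justifies termination.
def pvBlockB : (lines : List (List Char)) → (level : Option Nat) →
    { r : List (List Char) × List (List Char) // r.2.length ≤ lines.length }
  | [], _ => ⟨([], []), Nat.le_refl _⟩
  | line :: rest, level =>
    let s := PySem.Chars.lstrip line
    if s.isEmpty then
      match pvBlockB rest level with
      | ⟨(o, rem), h⟩ => ⟨(line :: o, rem), Nat.le_succ_of_le h⟩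
    else
      let ci := line.length - s.length
      if (match level with | some l => decide (ci ≤ l) | none => false) then
        ⟨([], line :: rest), Nat.le_refl _⟩
      else if PySem.Chars.endswith s [':'] then
        match pvBlockB rest (some ci) with
        | ⟨(inner, rem), h⟩ =>
          match pvBlockB rem level with
          | ⟨(after, rem2), h2⟩ =>
            ⟨(PySem.Chars.replace line [':'] [' ', '{'] :: inner ++ (List.replicate ci ' ' ++ ['}']) :: after,
               rem2), Nat.le_succ_of_le (Nat.le_trans h2 h)⟩
      else
        let line2 :=
          if !(PySem.Chars.startswith s ['#'] || PySem.Chars.startswith s ['/', '/']) &&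
             !(PySem.Chars.endswith s [';'])
          then PySem.Chars.rstrip line ++ [';'] else line
        match pvBlockB rest level with
        | ⟨(o, rem), h⟩ => ⟨(line2 :: o, rem), Nat.le_succ_of_le h⟩
termination_by lines _ => lines.length
decreasing_by
  · simp
  · simp
  · exact Nat.lt_succ_of_le h
  · simp

def translate_fc_to_cpp_alt (fc_code : String) : String :=
  String.mk (PySem.Chars.join ['\n']
    (pvBlockB ((PySem.Str.splitlines fc_code).map String.toList) none).val.1)

-- ===== PRECONDITION & SPEC =====
def Spec_translate_fc_to_cpp (fc_code : String) (out : String) : Prop := out = translate_fc_to_cpp_alt fc_code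
instance (fc_code : String) (out : String) : Decidable (Spec_translate_fc_to_cpp fc_code out) := by unfold Spec_translate_fc_to_cpp; infer_instance

-- ===== CLAIM (what is proved, stated in full; the proofs are below) =====
def Claim_equal_translate_fc_to_cpp : Prop := ∀ (fc_code : String), Dom_translate_fc_to_cpp fc_code → Spec_translate_fc_to_cpp fc_code (translate_fc_to_cpp fc_code)

-- ===== LEMMAS AND PROOFS =====

-- B's nested recursions, seen with their stack of active levels explicit
-- (head = innermost): the blocks still open run one after the other, each
-- followed by its closing brace.
def pvChain : List (List Char) → List Nat → List (List Char)
  | lines, [] => (pvBlockB lines none).val.1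
  | lines, l :: p =>
    (pvBlockB lines (some l)).val.1 ++
      pvBraceA l :: pvChain (pvBlockB lines (some l)).val.2 p
termination_by _ p => p.length

theorem chain_nil (p : List Nat) : pvChain [] p = p.map pvBraceA := by
  induction p with
  | nil => simp [pvChain, pvBlockB]
  | cons l p ih => simp [pvChain, pvBlockB, ih, pvBraceA]

-- unfoldings of pvChain, one per shape of the first line
theorem chain_blank (line : List Char) (rest : List (List Char)) (p : List Nat)
    (hs : (PySem.Chars.lstrip line).isEmpty) :
    pvChain (line :: rest) p = line :: pvChain rest p := by
  cases p with
  | nil => simp [pvChain, pvBlockB, hs]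
  | cons l p => simp [pvChain, pvBlockB, hs]

theorem chain_pop (line : List Char) (rest : List (List Char)) (l : Nat) (p : List Nat)
    (hs : ¬ (PySem.Chars.lstrip line).isEmpty)
    (hle : line.length - (PySem.Chars.lstrip line).length ≤ l) :
    pvChain (line :: rest) (l :: p) = pvBraceA l :: pvChain (line :: rest) p := by
  simp [pvChain, pvBlockB, hs, hle]

theorem chain_header_nil (line : List Char) (rest : List (List Char))
    (hs : ¬ (PySem.Chars.lstrip line).isEmpty)
    (hc : PySem.Chars.endswith (PySem.Chars.lstrip line) [':'] = true) :
    pvChain (line :: rest) [] =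
      PySem.Chars.replace line [':'] [' ', '{'] ::
        pvChain rest [line.length - (PySem.Chars.lstrip line).length] := by
  simp [pvChain, pvBlockB, hs, hc, pvBraceA]

theorem chain_header_cons (line : List Char) (rest : List (List Char)) (l : Nat) (p : List Nat)
    (hs : ¬ (PySem.Chars.lstrip line).isEmpty)
    (hgt : ¬ line.length - (PySem.Chars.lstrip line).length ≤ l)
    (hc : PySem.Chars.endswith (PySem.Chars.lstrip line) [':'] = true) :
    pvChain (line :: rest) (l :: p) =
      PySem.Chars.replace line [':'] [' ', '{'] ::
        pvChain rest ((line.length - (PySem.Chars.lstrip line).length) :: l :: p) := by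
  simp [pvChain, pvBlockB, hs, hgt, hc, List.append_assoc, pvBraceA]

theorem chain_normal (line : List Char) (rest : List (List Char)) (p : List Nat)
    (hs : ¬ (PySem.Chars.lstrip line).isEmpty)
    (hc : ¬ PySem.Chars.endswith (PySem.Chars.lstrip line) [':'] = true)
    (hp : p = [] ∨ ∃ l p', p = l :: p' ∧ ¬ line.length - (PySem.Chars.lstrip line).length ≤ l) :
    pvChain (line :: rest) p =
      (if !(PySem.Chars.startswith (PySem.Chars.lstrip line) ['#'] ||
            PySem.Chars.startswith (PySem.Chars.lstrip line) ['/', '/']) &&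
          !(PySem.Chars.endswith (PySem.Chars.lstrip line) [';'])
       then PySem.Chars.rstrip line ++ [';'] else line) :: pvChain rest p := by
  rcases hp with rfl | ⟨l, p', rfl, hgt⟩
  · simp [pvChain, pvBlockB, hs, hc]
  · simp [pvChain, pvBlockB, hs, hgt, hc]

-- the matching unfolding of pvLoopA when the pop loop fires once
theorem loop_pop (line : List Char) (rest : List (List Char)) (l : Nat) (p : List Nat)
    (hs : ¬ (PySem.Chars.lstrip line).isEmpty)
    (hle : line.length - (PySem.Chars.lstrip line).length ≤ l) :
    pvLoopA (line :: rest) (l :: p) = pvBraceA l :: pvLoopA (line :: rest) p := by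
  by_cases hc : PySem.Chars.endswith (PySem.Chars.lstrip line) [':'] = true
  · simp [pvLoopA, pvCloseWhile, hs, hle, hc]
  · simp [pvLoopA, pvCloseWhile, hs, hle, hc]

theorem loop_eq_chain (lines : List (List Char)) :
    ∀ p : List Nat, pvLoopA lines p = pvChain lines p := by
  induction lines with
  | nil =>
    intro p; rw [chain_nil]; rfl
  | cons line rest IH =>
    intro p
    induction p with
    | nil =>
      by_cases hs : (PySem.Chars.lstrip line).isEmpty
      · rw [chain_blank line rest [] hs]; simp [pvLoopA, hs, IH []]
      · by_cases hc : PySem.Chars.endswith (PySem.Chars.lstrip line) [':'] = true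
        · rw [chain_header_nil line rest hs hc]
          simp [pvLoopA, pvCloseWhile, hs, hc, IH]
        · rw [chain_normal line rest [] hs hc (Or.inl rfl)]
          simp [pvLoopA, pvCloseWhile, hs, hc, IH]
    | cons l p ihp =>
      by_cases hs : (PySem.Chars.lstrip line).isEmpty
      · rw [chain_blank line rest _ hs]; simp [pvLoopA, hs, IH]
      · by_cases hle : line.length - (PySem.Chars.lstrip line).length ≤ l
        · rw [loop_pop line rest l p hs hle, chain_pop line rest l p hs hle, ihp]
        · by_cases hc : PySem.Chars.endswith (PySem.Chars.lstrip line) [':'] = true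
          · rw [chain_header_cons line rest l p hs hle hc]
            simp [pvLoopA, pvCloseWhile, hs, hle, hc, IH]
          · rw [chain_normal line rest (l :: p) hs hc (Or.inr ⟨l, p, rfl, hle⟩)]
            simp [pvLoopA, pvCloseWhile, hs, hle, hc, IH]

-- ===== VERDICT (by name: the statement is the Claim_ definition above) =====
theorem translate_fc_to_cpp_spec : Claim_equal_translate_fc_to_cpp := by
  intro fc _
  unfold Spec_translate_fc_to_cpp translate_fc_to_cpp translate_fc_to_cpp_alt
  rw [loop_eq_chain]
  simp only [pvChain]
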